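-- pv_equiv track=rewrite | github.com/Kornil17/interview_preparing | algoritms/decision_methods/prefix_summ/min_valid_index.py | min_valid_index
-- ===== SOURCE A (Python) =====
-- def min_valid_index(nums, k, m):
--     n = len(nums)
--     p = [0] * (n + 1)
--
--     for i in range(1, n + 1):
--         p[i] = p[i - 1] + nums[i - 1]
--
--     for i in range(n - k):
--         if p[i + k + 1] - p[i] == m:
--             return i
--
--     return -1
-- ===== SOURCE B (Python) =====
-- def min_valid_index(nums, k, m):
--     s = 0
--     for j, x in enumerate(nums):
--         s += x
--         if j > k:
--             s -= nums[j - k - 1]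
--         if j >= k and s == m:
--             return j - k
--     return -1
-- ===== Notes on version B (the rewrite author's own statement) =====
-- stated objective: simpler
-- what changed: B drops A's (n+1)-element prefix-sum array and its second index scan, maintaining one running window sum in a single enumerate pass; Pre_ excludes negative k (window of non-positive length), where A reads the prefix array with Python negative-index wraparound or raises IndexError, a corner no one would specify.
-- outside the precondition, e.g. on min_valid_index([1, 2, 3], -1, 0): A returns 0, B returns 1; on min_valid_index([1, 2, 3], -2, -2): A returns 2, B returns 3
import Mathlib
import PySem

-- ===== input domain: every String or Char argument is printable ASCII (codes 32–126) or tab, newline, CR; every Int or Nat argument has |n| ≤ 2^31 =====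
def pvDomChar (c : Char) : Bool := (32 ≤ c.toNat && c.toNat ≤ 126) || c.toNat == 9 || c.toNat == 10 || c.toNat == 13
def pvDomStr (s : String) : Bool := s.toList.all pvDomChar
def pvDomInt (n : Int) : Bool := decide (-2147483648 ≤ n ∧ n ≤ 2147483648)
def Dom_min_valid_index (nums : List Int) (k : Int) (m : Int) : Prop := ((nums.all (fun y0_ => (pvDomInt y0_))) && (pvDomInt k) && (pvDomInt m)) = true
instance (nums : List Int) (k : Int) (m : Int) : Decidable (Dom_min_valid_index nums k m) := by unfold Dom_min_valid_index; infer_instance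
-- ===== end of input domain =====

-- B replaces A's prefix-sum array (built first, scanned second) by one running window sum in a single pass.

-- ===== PORT A =====
def min_valid_index (nums : List Int) (k : Int) (m : Int) : Int :=
  let n : Int := PySem.List.len nums
  let p0 : List Int := List.replicate (n + 1).toNat 0
  let p : List Int := (PySem.List.pyRange 1 (n + 1) 1).foldl
    (fun p i => PySem.List.pySetD p i
      (PySem.List.pyGetD p (i - 1) 0 + PySem.List.pyGetD nums (i - 1) 0)) p0
  match (PySem.List.pyRange 0 (n - k) 1).find?
      (fun i => PySem.List.pyGetD p (i + k + 1) 0 - PySem.List.pyGetD p i 0 == m) with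
  | some i => i
  | none => -1

-- ===== PORT B =====
-- Source B's 'for j, x in enumerate(nums)' loop, carrying the running window sum s
def mviGo (nums : List Int) (k m : Int) : List (Int × Int) → Int → Int
  | [], _ => -1
  | (j, x) :: rest, s =>
    let s1 := s + x
    let s2 := if k < j then s1 - PySem.List.pyGetD nums (j - k - 1) 0 else s1
    if k ≤ j ∧ s2 = m then j - k else mviGo nums k m rest s2

def min_valid_index_alt (nums : List Int) (k : Int) (m : Int) : Int :=
  mviGo nums k m (PySem.List.enumerate nums 0) 0

-- ===== PRECONDITION & SPEC =====
-- Pre_ excludes negative k (a window of non-positive length, outside the function's natural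
-- domain): there A's p[i+k+1]-p[i] reads the prefix array via Python negative-index wraparound
-- or raises IndexError, and neither A's nor B's value on such inputs is one anyone would specify.
def Pre_min_valid_index (nums : List Int) (k : Int) (m : Int) : Prop := 0 ≤ k
instance (nums : List Int) (k : Int) (m : Int) : Decidable (Pre_min_valid_index nums k m) := by
  unfold Pre_min_valid_index; infer_instance

def pvWitness_min_valid_index : List Int × Int × Int := ([1, 2, 3], 1, 5)

def Spec_min_valid_index (nums : List Int) (k : Int) (m : Int) (out : Int) : Prop := out = min_valid_index_alt nums k m
instance (nums : List Int) (k : Int) (m : Int) (out : Int) : Decidable (Spec_min_valid_index nums k m out) := by unfold Spec_min_valid_index; infer_instance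

-- ===== CLAIM (what is proved, stated in full; the proofs are below) =====
def Claim_equal_min_valid_index : Prop := ∀ (nums : List Int) (k : Int) (m : Int), Dom_min_valid_index nums k m → Pre_min_valid_index nums k m → Spec_min_valid_index nums k m (min_valid_index nums k m)

-- ===== LEMMAS AND PROOFS =====

-- the list of prefix sums A builds: entry j is the sum of the first j elements
def pvPre (nums : List Int) : List Int :=
  (List.range (nums.length + 1)).map (fun j => (nums.take j).sum)

theorem pvPre_get (nums : List Int) (i : Int) (h0 : 0 ≤ i) (h : i ≤ (nums.length : Int)) :
    PySem.List.pyGetD (pvPre nums) i 0 = (nums.take i.toNat).sum := by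
  rw [PySem.List.pyGetD_eq_getElem (pvPre nums) 0 h0 (by simp [pvPre]; omega)]
  simp [pvPre]

theorem pvSum_take_succ (nums : List Int) (t : Nat) (h : t < nums.length) :
    (nums.take (t + 1)).sum = (nums.take t).sum + nums[t] := by
  exact List.sum_take_succ nums t h

theorem pvBuild (nums : List Int) (c j : Nat) (hcj : j + c = nums.length) :
    (PySem.List.pyRange ((j : Int) + 1) ((nums.length : Int) + 1) 1).foldl
      (fun p i => PySem.List.pySetD p i
        (PySem.List.pyGetD p (i - 1) 0 + PySem.List.pyGetD nums (i - 1) 0))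
      ((pvPre nums).take (j + 1) ++ List.replicate (nums.length - j) 0)
    = pvPre nums := by
  induction c generalizing j with
  | zero =>
    have hj : j = nums.length := by omega
    subst hj
    rw [PySem.List.pyRange_one_eq_nil (by omega)]
    simp [pvPre, List.take_of_length_le, List.length_map]
  | succ c ih =>
    have hjn : j < nums.length := by omega
    have l1 : ((pvPre nums).take (j + 1)).length = j + 1 := by
      simp [pvPre]; omega
    rw [PySem.List.pyRange_one_cons (by omega), List.foldl_cons]
    have e1 : (j : Int) + 1 - 1 = (j : Int) := by ring
    have hget1 : PySem.List.pyGetD ((pvPre nums).take (j + 1) ++ List.replicate (nums.length - j) 0) ((j : Int)) 0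
        = (nums.take j).sum := by
      rw [PySem.List.pyGetD_eq_getElem _ 0 (by omega) (by simp [pvPre]; omega)]
      rw [List.getElem_append_left (by omega)]
      simp [pvPre]
    have hget2 : PySem.List.pyGetD nums ((j : Int)) 0 = nums[j] := by
      rw [PySem.List.pyGetD_natCast, List.getD_eq_getElem _ _ hjn]
    have e2 : (j : Int) + 1 = ((j + 1 : Nat) : Int) := by push_cast; ring
    have hstep : PySem.List.pySetD ((pvPre nums).take (j + 1) ++ List.replicate (nums.length - j) 0)
          ((j : Int) + 1) ((nums.take j).sum + nums[j])
        = (pvPre nums).take (j + 1 + 1) ++ List.replicate (nums.length - (j + 1)) 0 := by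
      rw [e2, PySem.List.pySetD_natCast, List.set_append]
      rw [if_neg (by omega)]
      have hrep : nums.length - j = (nums.length - (j + 1)) + 1 := by omega
      rw [l1, hrep, List.replicate_succ]
      simp only [Nat.sub_self, List.set_cons_zero]
      have htake : (pvPre nums).take (j + 1 + 1) = (pvPre nums).take (j + 1) ++ [(nums.take (j + 1)).sum] := by
        rw [List.take_add_one]
        congr 1
        have : (pvPre nums)[j + 1]? = some ((nums.take (j + 1)).sum) := by
          rw [List.getElem?_eq_getElem (by simp [pvPre]; omega)]
          simp [pvPre]
        simp [this]
      rw [htake, pvSum_take_succ nums j hjn]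
      simp
    rw [e1, hget1, hget2, hstep]
    have := ih (j + 1) (by omega)
    push_cast at this ⊢
    convert this using 2

theorem pvA_eq_find (nums : List Int) (k m : Int) :
    min_valid_index nums k m =
      (match (PySem.List.pyRange 0 ((nums.length : Int) - k) 1).find?
        (fun i => PySem.List.pyGetD (pvPre nums) (i + k + 1) 0
                  - PySem.List.pyGetD (pvPre nums) i 0 == m) with
      | some i => i
      | none => -1) := by
  simp only [min_valid_index, PySem.List.len_eq]
  have hb := pvBuild nums nums.length 0 (by omega)
  push_cast at hb
  have hinit : List.replicate ((nums.length : Int) + 1).toNat (0 : Int)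
      = (pvPre nums).take (0 + 1) ++ List.replicate (nums.length - 0) 0 := by
    have h1 : ((nums.length : Int) + 1).toNat = nums.length + 1 := by omega
    rw [h1]
    simp [pvPre, List.range_succ_eq_map, List.replicate_succ]
  rw [hinit, hb]

-- B's loop from element j onward, with the running sum equal to the current window sum
theorem pvGo_eq_find (nums : List Int) (k m : Int) (K : Nat) (hkK : (K : Int) = k) :
    ∀ (l : List Int) (j : Nat), nums.drop j = l →
    mviGo nums k m (PySem.List.enumerate l (j : Int))
        ((nums.take j).sum - (nums.take (j - (K + 1))).sum) =
      (match (PySem.List.pyRange ((j - K : Nat) : Int) ((nums.length : Int) - k) 1).find?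
        (fun i => PySem.List.pyGetD (pvPre nums) (i + k + 1) 0
                  - PySem.List.pyGetD (pvPre nums) i 0 == m) with
      | some i => i
      | none => -1) := by
  intro l
  induction l with
  | nil =>
    intro j hd
    have hjn : nums.length ≤ j := by
      by_contra h
      have := List.drop_eq_nil_iff.mp hd
      omega
    rw [PySem.List.pyRange_one_eq_nil (by omega)]
    simp [PySem.List.enumerate, mviGo]
  | cons x rest ih =>
    intro j hd
    have hjn : j < nums.length := by
      by_contra h
      rw [List.drop_eq_nil_iff.mpr (by omega)] at hd
      simp at hd
    have hx : x = nums[j] := by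
      have h1 : (nums.drop j)[0]? = some x := by rw [hd]; rfl
      rw [List.getElem?_drop] at h1
      simp only [Nat.add_zero, List.getElem?_eq_getElem hjn, Option.some.injEq] at h1
      exact h1.symm
    have hrest : nums.drop (j + 1) = rest := by
      have : nums.drop (j + 1) = (nums.drop j).drop 1 := by
        rw [List.drop_drop]
      simpa [hd] using this
    rw [PySem.List.enumerate_cons]
    show mviGo nums k m (((j : Int), x) :: PySem.List.enumerate rest ((j : Int) + 1)) _ = _
    simp only [mviGo]
    by_cases hjk : K < j
    case neg =>
      -- warm-up phase: j ≤ K, no subtraction, no check yet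
      have hlt : ¬ k < (j : Int) := by omega
      have hsub : j - (K + 1) = 0 := by omega
      have hsub' : (j + 1) - (K + 1) = 0 := by omega
      have hs2 : (nums.take j).sum - (nums.take (j - (K + 1))).sum + x
          = (nums.take (j + 1)).sum - (nums.take ((j + 1) - (K + 1))).sum := by
        rw [hsub, hsub', hx, pvSum_take_succ nums j hjn]
        simp
      rw [if_neg hlt]
      by_cases hkle : k ≤ (j : Int)
      · -- k ≤ j ≤ K = k forces j = K, contradiction with ¬ K < j unless j = K;
        -- j = K and ¬ K < j is consistent (j = K); then k ≤ j holds and k < j fails: check happens!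
        -- handle below
        have hjK : j = K := by omega
        -- this is the first checked element: i = 0 = j - K
        have hrange : ((j - K : Nat) : Int) = (j : Int) - k := by omega
        by_cases hm2 : (nums.take j).sum - (nums.take (j - (K + 1))).sum + x = m
        · rw [if_pos ⟨hkle, hm2⟩]
          have hne : ((j - K : Nat) : Int) < (nums.length : Int) - k := by omega
          rw [PySem.List.pyRange_one_cons hne]
          have hpred : (PySem.List.pyGetD (pvPre nums) (((j - K : Nat) : Int) + k + 1) 0
              - PySem.List.pyGetD (pvPre nums) (((j - K : Nat) : Int)) 0 == m) = true := by
            rw [hrange]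
            have e1 : (j : Int) - k + k + 1 = ((j + 1 : Nat) : Int) := by push_cast; ring
            rw [e1, pvPre_get nums _ (by omega) (by omega),
                pvPre_get nums ((j : Int) - k) (by omega) (by omega)]
            have e2 : (((j + 1 : Nat) : Int)).toNat = j + 1 := by omega
            have e3 : (((j : Int) - k)).toNat = j - K := by omega
            rw [e2, e3]
            have : (nums.take (j + 1)).sum - (nums.take (j - K)).sum = m := by
              rw [pvSum_take_succ nums j hjn, ← hx]
              have : j - K = j - (K + 1) := by omega
              rw [this]; omega
            simp [this]
          rw [List.find?_cons, hpred]
          exact (show ((j : Int) - k = ((j - K : Nat) : Int)) by omega)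
        · rw [if_neg (by intro h; exact hm2 h.2)]
          have hne : ((j - K : Nat) : Int) < (nums.length : Int) - k := by omega
          rw [PySem.List.pyRange_one_cons hne]
          have hpred : (PySem.List.pyGetD (pvPre nums) (((j - K : Nat) : Int) + k + 1) 0
              - PySem.List.pyGetD (pvPre nums) (((j - K : Nat) : Int)) 0 == m) = false := by
            rw [hrange]
            have e1 : (j : Int) - k + k + 1 = ((j + 1 : Nat) : Int) := by push_cast; ring
            rw [e1, pvPre_get nums _ (by omega) (by omega),
                pvPre_get nums ((j : Int) - k) (by omega) (by omega)]
            have e2 : (((j + 1 : Nat) : Int)).toNat = j + 1 := by omega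
            have e3 : (((j : Int) - k)).toNat = j - K := by omega
            rw [e2, e3]
            have hne2 : (nums.take (j + 1)).sum - (nums.take (j - K)).sum ≠ m := by
              rw [pvSum_take_succ nums j hjn, ← hx]
              have : j - K = j - (K + 1) := by omega
              rw [this]; omega
            simp [hne2]
          rw [List.find?_cons, hpred]
          have e4 : ((j - K : Nat) : Int) + 1 = (((j + 1) - K : Nat) : Int) := by omega
          have ej : (j : Int) + 1 = ((j + 1 : Nat) : Int) := by push_cast; ring
          rw [e4, ej, hs2]
          exact ih (j + 1) hrest
      · rw [if_neg (by intro h; exact hkle h.1)]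
        have e4 : ((j - K : Nat) : Int) = (((j + 1) - K : Nat) : Int) := by omega
        have ej : (j : Int) + 1 = ((j + 1 : Nat) : Int) := by push_cast; ring
        rw [e4, ej, hs2]
        exact ih (j + 1) hrest
    case pos =>
      -- steady phase: K < j, subtract the element leaving the window, then check
      have hlt : k < (j : Int) := by omega
      rw [if_pos hlt]
      have hidx : (j : Int) - k - 1 = ((j - K - 1 : Nat) : Int) := by omega
      have hidxlt : j - K - 1 < nums.length := by omega
      have hgetold : PySem.List.pyGetD nums ((j : Int) - k - 1) 0 = nums[j - K - 1] := by
        rw [hidx, PySem.List.pyGetD_natCast, List.getD_eq_getElem _ _ hidxlt]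
      have hsub : j - (K + 1) = (j - K - 1) := by omega
      have hs2 : (nums.take j).sum - (nums.take (j - (K + 1))).sum + x
            - PySem.List.pyGetD nums ((j : Int) - k - 1) 0
          = (nums.take (j + 1)).sum - (nums.take ((j + 1) - (K + 1))).sum := by
        rw [hgetold, hsub, hx, pvSum_take_succ nums j hjn]
        have e5 : (j + 1) - (K + 1) = (j - K - 1) + 1 := by omega
        rw [e5, pvSum_take_succ nums (j - K - 1) hidxlt]
        ring
      rw [hs2]
      have hne : ((j - K : Nat) : Int) < (nums.length : Int) - k := by omega
      rw [PySem.List.pyRange_one_cons hne]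
      have hrange : ((j - K : Nat) : Int) = (j : Int) - k := by omega
      have hpredspec : (PySem.List.pyGetD (pvPre nums) (((j - K : Nat) : Int) + k + 1) 0
            - PySem.List.pyGetD (pvPre nums) (((j - K : Nat) : Int)) 0 == m)
          = decide ((nums.take (j + 1)).sum - (nums.take ((j + 1) - (K + 1))).sum = m) := by
        rw [hrange]
        have e1 : (j : Int) - k + k + 1 = ((j + 1 : Nat) : Int) := by push_cast; ring
        rw [e1, pvPre_get nums _ (by omega) (by omega),
            pvPre_get nums ((j : Int) - k) (by omega) (by omega)]
        have e2 : (((j + 1 : Nat) : Int)).toNat = j + 1 := by omega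
        have e3 : (((j : Int) - k)).toNat = j - K := by omega
        have e5 : (j + 1) - (K + 1) = j - K := by omega
        rw [e2, e3, e5]
        rfl
      by_cases hm2 : (nums.take (j + 1)).sum - (nums.take ((j + 1) - (K + 1))).sum = m
      · rw [if_pos ⟨by omega, hm2⟩, List.find?_cons]
        rw [hpredspec, decide_eq_true hm2]
        exact (show ((j : Int) - k = ((j - K : Nat) : Int)) by omega)
      · rw [if_neg (by intro h; exact hm2 h.2), List.find?_cons]
        rw [hpredspec, decide_eq_false hm2]
        have e4 : ((j - K : Nat) : Int) + 1 = (((j + 1) - K : Nat) : Int) := by omega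
        have ej : (j : Int) + 1 = ((j + 1 : Nat) : Int) := by push_cast; ring
        rw [e4, ej]
        exact ih (j + 1) hrest

-- ===== VERDICT (by name: the statement is the Claim_ definition above) =====
theorem min_valid_index_spec : Claim_equal_min_valid_index := by
  intro nums k m _ hpre
  unfold Pre_min_valid_index at hpre
  unfold Spec_min_valid_index
  rw [pvA_eq_find]
  have h := pvGo_eq_find nums k m k.toNat (by omega) nums 0 (by simp)
  simp only [Nat.zero_sub, Nat.cast_zero, List.take_zero, List.sum_nil, sub_zero,
    List.take, List.sum_nil] at h
  simpa [min_valid_index_alt] using h.symm
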